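-- pv_equiv track=rewrite | github.com/menpo/menpowidgets | menpowidgets/utils.py | list_has_constant_step
-- ===== SOURCE A (Python) =====
-- def list_has_constant_step(l):
--     r"""
--     Function that checks if a list of integers has a constant step between them
--     and returns the step.
--
--     Parameters
--     ----------
--     l : `list`
--         The list to check.
--
--     Returns
--     -------
--     has_constant_step : `bool`
--         ``True`` if the `list` elements have a constant step between them.
--     step : `int`
--         The step value. ``None`` if `has_constant_step` is ``False``.
--     """
--     if len(l) <= 1:
--         return False, 1
--     step = l[1] - l[0]
--     s = step
--     i = 2
--     while s == step and i < len(l):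
--         s = l[i] - l[i - 1]
--         i += 1
--     if i == len(l) and s == step:
--         return True, step
--     else:
--         return False, 1
-- ===== SOURCE B (Python) =====
-- def list_has_constant_step(l):
--     if len(l) <= 1:
--         return False, 1
--     diffs = {b - a for a, b in zip(l, l[1:])}
--     if len(diffs) == 1:
--         return True, l[1] - l[0]
--     return False, 1
-- ===== Notes on version B (the rewrite author's own statement) =====
-- stated objective: idiomatic
-- what changed: Replaces the index-based while loop with manual short-circuiting by a set comprehension over zipped consecutive pairs: the list has a constant step iff the set of consecutive differences has exactly one element.
import Mathlib
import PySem

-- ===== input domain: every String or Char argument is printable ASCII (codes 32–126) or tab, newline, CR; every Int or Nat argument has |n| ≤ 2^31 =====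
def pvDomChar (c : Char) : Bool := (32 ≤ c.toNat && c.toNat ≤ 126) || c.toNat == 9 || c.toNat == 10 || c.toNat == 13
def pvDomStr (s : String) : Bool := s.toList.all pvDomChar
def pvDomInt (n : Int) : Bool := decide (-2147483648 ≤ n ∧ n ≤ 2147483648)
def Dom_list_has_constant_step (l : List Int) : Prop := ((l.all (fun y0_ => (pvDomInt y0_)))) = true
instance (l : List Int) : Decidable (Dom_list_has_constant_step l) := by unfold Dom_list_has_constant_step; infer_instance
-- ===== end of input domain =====

-- B replaces A's index-based short-circuiting while loop by the set of consecutive differences (idiomatic, same cost).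

-- ===== PORT A =====
-- A's while loop: while s == step and i < len(l): s = l[i] - l[i-1]; i += 1  (indices always in range here)
def pvLoopA (l : List Int) (step : Int) (s : Int) (i : Nat) : Int × Nat :=
  if _h : s = step ∧ i < l.length then
    pvLoopA l step (l.getD i 0 - l.getD (i - 1) 0) (i + 1)
  else (s, i)
termination_by l.length - i
decreasing_by omega

def list_has_constant_step (l : List Int) : Bool × Int :=
  if l.length ≤ 1 then (false, 1)
  else
    let step := l.getD 1 0 - l.getD 0 0
    let r := pvLoopA l step step 2
    if r.2 = l.length ∧ r.1 = step then (true, step) else (false, 1)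

-- ===== PORT B =====
def list_has_constant_step_alt (l : List Int) : Bool × Int :=
  if l.length ≤ 1 then (false, 1)
  else
    let diffs := (l.zip (l.drop 1)).map (fun p => p.2 - p.1)
    let s : PySem.Set Int := PySem.Set.ofList diffs
    if s.length = 1 then (true, l.getD 1 0 - l.getD 0 0) else (false, 1)

-- ===== PRECONDITION & SPEC =====
def Spec_list_has_constant_step (l : List Int) (out : Bool × Int) : Prop := out = list_has_constant_step_alt l
instance (l : List Int) (out : Bool × Int) : Decidable (Spec_list_has_constant_step l out) := by unfold Spec_list_has_constant_step; infer_instance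

-- ===== CLAIM (what is proved, stated in full; the proofs are below) =====
def Claim_equal_list_has_constant_step : Prop := ∀ (l : List Int), Dom_list_has_constant_step l → Spec_list_has_constant_step l (list_has_constant_step l)

-- ===== LEMMAS AND PROOFS =====

-- A's loop ends with i = len and s = step iff s = step and every remaining consecutive difference equals step
theorem pvLoopA_char (l : List Int) (step s : Int) (i : Nat) :
    i ≤ l.length →
    (((pvLoopA l step s i).2 = l.length ∧ (pvLoopA l step s i).1 = step) ↔
      (s = step ∧ ∀ k, i ≤ k → k < l.length → l.getD k 0 - l.getD (k - 1) 0 = step)) := by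
  induction s, i using pvLoopA.induct (l := l) (step := step) with
  | case1 s i h ih =>
    intro _
    rw [pvLoopA, dif_pos h]
    obtain ⟨hs, hlt⟩ := h
    rw [ih (by omega)]
    subst hs
    constructor
    · rintro ⟨hd, hrest⟩
      refine ⟨rfl, fun k hk1 hk2 => ?_⟩
      rcases Nat.eq_or_lt_of_le hk1 with h' | h'
      · exact h' ▸ hd
      · exact hrest k h' hk2
    · rintro ⟨-, hall⟩
      exact ⟨hall i le_rfl hlt, fun k hk1 hk2 => hall k (by omega) hk2⟩
  | case2 s i h =>
    intro hi
    rw [pvLoopA, dif_neg h]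
    push Not at h
    constructor
    · rintro ⟨h1, h2⟩
      exact ⟨h2, fun k hk1 hk2 => absurd (h h2) (by omega)⟩
    · rintro ⟨hs, -⟩
      exact ⟨by have := h hs; omega, hs⟩

-- membership in the list of consecutive differences, by index
theorem mem_diffs (l : List Int) (y : Int) :
    y ∈ (l.zip (l.drop 1)).map (fun p => p.2 - p.1) ↔
      ∃ k, k + 1 < l.length ∧ y = l.getD (k + 1) 0 - l.getD k 0 := by
  rw [List.mem_map]
  constructor
  · rintro ⟨p, hp, hy⟩
    rw [List.mem_iff_getElem] at hp
    obtain ⟨k, hk, hpk⟩ := hp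
    rw [List.length_zip, List.length_drop] at hk
    have hklen : k + 1 < l.length := by omega
    refine ⟨k, hklen, ?_⟩
    rw [← hy, ← hpk, List.getElem_zip]
    simp only [List.getElem_drop]
    rw [List.getD_eq_getElem l 0 hklen, List.getD_eq_getElem l 0 (by omega : k < l.length)]
    congr 1
    exact getElem_congr rfl (by omega) (by omega)
  · rintro ⟨k, hk, hy⟩
    have hkz : k < (l.zip (l.drop 1)).length := by
      rw [List.length_zip, List.length_drop]; omega
    refine ⟨(l.zip (l.drop 1))[k]'hkz, List.getElem_mem hkz, ?_⟩
    rw [List.getElem_zip]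
    simp only [List.getElem_drop]
    rw [hy, List.getD_eq_getElem l 0 hk, List.getD_eq_getElem l 0 (by omega : k < l.length)]
    congr 1
    exact getElem_congr rfl (by omega) (by omega)

-- if every element equals x, the set folds to [x]
theorem foldl_add_const (xs : List Int) (x : Int) (h : ∀ y ∈ xs, y = x) :
    xs.foldl PySem.Set.add [x] = [x] := by
  induction xs with
  | nil => rfl
  | cons z zs ih =>
    have hz : z = x := h z (by simp)
    subst hz
    simp only [List.foldl_cons]
    have : PySem.Set.add [z] z = [z] := by simp [PySem.Set.add, PySem.Set.contains]
    rw [this]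
    exact ih fun y hy => h y (by simp [hy])

-- singleton set of the diffs iff every diff equals the head diff
theorem ofList_cons_len_one (x : Int) (xs : List Int) :
    (PySem.Set.ofList (x :: xs)).length = 1 ↔ ∀ y ∈ xs, y = x := by
  constructor
  · intro h1 y hy
    by_contra hne
    have hx : x ∈ PySem.Set.ofList (x :: xs) := by
      rw [PySem.Set.mem_ofList]; simp
    have hyy : y ∈ PySem.Set.ofList (x :: xs) := by
      rw [PySem.Set.mem_ofList]; simp [hy]
    rcases hl : PySem.Set.ofList (x :: xs) with _ | ⟨a, rest⟩
    · simp [hl] at hx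
    · rw [hl] at h1 hx hyy
      have : rest = [] := by simpa using h1
      subst this
      simp at hx hyy
      exact hne (hyy.trans hx.symm)
  · intro h
    have : PySem.Set.ofList (x :: xs) = [x] := by
      show (x :: xs).foldl PySem.Set.add [] = [x]
      simp only [List.foldl_cons]
      have : PySem.Set.add [] x = [x] := by simp [PySem.Set.add, PySem.Set.contains]
      rw [this]
      exact foldl_add_const xs x h
    simp [this]

-- ===== VERDICT (by name: the statement is the Claim_ definition above) =====
theorem list_has_constant_step_spec : Claim_equal_list_has_constant_step := by
  intro l _
  show list_has_constant_step l = list_has_constant_step_alt l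
  unfold list_has_constant_step list_has_constant_step_alt
  by_cases hlen : l.length ≤ 1
  · simp [hlen]
  · simp only [if_neg hlen]
    rcases l with _ | ⟨a, l'⟩
    · simp at hlen
    rcases l' with _ | ⟨b, r⟩
    · simp at hlen
    set l := a :: b :: r with hl
    have hd0 : l.getD 0 0 = a := rfl
    have hd1 : l.getD 1 0 = b := rfl
    set step := l.getD 1 0 - l.getD 0 0 with hstep
    have hba : step = b - a := by rw [hstep, hd0, hd1]
    have hdiffs : (l.zip (l.drop 1)).map (fun p => p.2 - p.1)
        = (b - a) :: ((b :: r).zip r).map (fun p => p.2 - p.1) := by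
      simp [hl]
    have hAB : ((pvLoopA l step step 2).2 = l.length ∧ (pvLoopA l step step 2).1 = step) ↔
        (PySem.Set.ofList ((l.zip (l.drop 1)).map (fun p => p.2 - p.1))).length = 1 := by
      rw [pvLoopA_char l step step 2 (by simp [hl]), hdiffs, ofList_cons_len_one]
      constructor
      · rintro ⟨-, hall⟩ y hy
        have hymem : y ∈ (l.zip (l.drop 1)).map (fun p => p.2 - p.1) := by
          rw [hdiffs]; simp [hy]
        rw [mem_diffs] at hymem
        obtain ⟨k, hk, hyk⟩ := hymem
        rcases Nat.eq_zero_or_pos k with h0 | h0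
        · subst h0; rw [hyk, hd0, hd1]
        · have := hall (k + 1) (by omega) (by omega)
          simp only [Nat.add_sub_cancel] at this
          rw [hyk, this, hba]
      · intro hall
        refine ⟨rfl, fun k hk1 hk2 => ?_⟩
        have hk1' : k - 1 + 1 = k := by omega
        have hmem : l.getD k 0 - l.getD (k - 1) 0 ∈ (l.zip (l.drop 1)).map (fun p => p.2 - p.1) := by
          rw [mem_diffs]
          exact ⟨k - 1, by omega, by rw [hk1']⟩
        rw [hdiffs] at hmem
        simp only [List.mem_cons] at hmem
        rcases hmem with h | h
        · rw [h, hba]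
        · rw [hall _ h, hba]
    by_cases hc : (pvLoopA l step step 2).2 = l.length ∧ (pvLoopA l step step 2).1 = step
    · rw [if_pos hc, if_pos (hAB.mp hc)]
    · rw [if_neg hc, if_neg (fun h => hc (hAB.mpr h))]
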